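-- pv_equiv track=rewrite | github.com/NuthanReddy/Nuthan | Problems/StableSegments.py | count_stable_segments
-- ===== SOURCE A (Python) =====
-- from collections import defaultdict
--
-- def count_stable_segments(input):
--     n = len(input)
--     if n < 3:
--         return 0
--     d = defaultdict(int)
--     d[(0, input[0])] = 1
--     r, s = 0, 0
--     for i in range(n - 1):
--         s += input[i]
--         r += d[(s - 3 * input[i], input[i])]
--         d[(s, input[i + 1])] += 1
--     return r
-- ===== SOURCE B (Python) =====
-- def count_stable_segments(input):
--     n = len(input)
--     if n < 3:
--         return 0
--     prefix = [0]
--     for x in input: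
--         prefix.append(prefix[-1] + x)
--     r = 0
--     for i in range(n - 1):
--         for t in range(i + 1):
--             if prefix[i + 1] - prefix[t] == 3 * input[i] and input[t] == input[i]:
--                 r += 1
--     return r
-- ===== Notes on version B (the rewrite author's own statement) =====
-- stated objective: alternative
-- what changed: Replaces the single-pass defaultdict of seen (prefix_sum, value) pairs by an explicit prefix-sum array and a direct double loop over all (t, i) index pairs.
import Mathlib
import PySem

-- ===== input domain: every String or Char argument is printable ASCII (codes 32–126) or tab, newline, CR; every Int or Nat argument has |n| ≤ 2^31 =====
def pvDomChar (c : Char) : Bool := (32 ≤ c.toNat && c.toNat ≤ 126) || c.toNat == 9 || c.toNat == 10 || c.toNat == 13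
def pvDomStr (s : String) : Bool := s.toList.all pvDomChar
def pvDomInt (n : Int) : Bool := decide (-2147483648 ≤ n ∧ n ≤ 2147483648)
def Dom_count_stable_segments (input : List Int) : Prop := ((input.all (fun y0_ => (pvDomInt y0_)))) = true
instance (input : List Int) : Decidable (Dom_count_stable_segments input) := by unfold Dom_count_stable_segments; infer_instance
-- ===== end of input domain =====

-- B replaces A's one-pass defaultdict of seen (pfx_sum, value) pairs by an explicit
-- pfx-sum array and a direct double loop over all (t, i) pairs (alternative, not faster).

-- ===== PORT A =====
-- every index used inside the loop is in range once n ≥ 3, so pyGetD is exact here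
def count_stable_segments (input : List Int) : Int :=
  let n : Int := input.length
  if n < 3 then 0
  else
    ((PySem.List.pyRange 0 (n - 1) 1).foldl
      (fun (st : PySem.Dict (Int × Int) Int × Int × Int) (i : Int) =>
        let s := st.2.2 + PySem.List.pyGetD input i 0
        let r := st.2.1 + st.1.getD (s - 3 * PySem.List.pyGetD input i 0, PySem.List.pyGetD input i 0) 0
        let d := st.1.modify (s, PySem.List.pyGetD input (i + 1) 0) 0 (· + 1)
        (d, r, s))
      (PySem.Dict.empty.insert (0, PySem.List.pyGetD input 0 0) 1, 0, 0)).2.1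

-- ===== PORT B =====
-- every index used is in range once n ≥ 3 (pfx is nonempty throughout), so pyGetD is exact here
def count_stable_segments_alt (input : List Int) : Int :=
  let n : Int := input.length
  if n < 3 then 0
  else
    let pfx := input.foldl (fun p x => p ++ [PySem.List.pyGetD p (-1) 0 + x]) ([0] : List Int)
    (PySem.List.pyRange 0 (n - 1) 1).foldl (fun r i =>
      (PySem.List.pyRange 0 (i + 1) 1).foldl (fun r t =>
        if PySem.List.pyGetD pfx (i + 1) 0 - PySem.List.pyGetD pfx t 0
              = 3 * PySem.List.pyGetD input i 0
            ∧ PySem.List.pyGetD input t 0 = PySem.List.pyGetD input i 0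
        then r + 1 else r) r) 0

-- ===== PRECONDITION & SPEC =====
def Spec_count_stable_segments (input : List Int) (out : Int) : Prop := out = count_stable_segments_alt input
instance (input : List Int) (out : Int) : Decidable (Spec_count_stable_segments input out) := by unfold Spec_count_stable_segments; infer_instance

-- ===== CLAIM (what is proved, stated in full; the proofs are below) =====
def Claim_equal_count_stable_segments : Prop := ∀ (input : List Int), Dom_count_stable_segments input → Spec_count_stable_segments input (count_stable_segments input)

-- ===== LEMMAS AND PROOFS =====

-- pfx sum of the first k elements, and the k-th element (both as the proofs' reference values)
def pvP (xs : List Int) (k : Nat) : Int := (xs.take k).sum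
def pvA (xs : List Int) (k : Nat) : Int := xs.getD k 0

-- number of stable segments ending at index i (t ranges over 0..i)
def pvCnt (xs : List Int) (i : Nat) : Int :=
  ((List.range (i + 1)).countP
    (fun t => decide (pvP xs (i + 1) - pvP xs t = 3 * pvA xs i ∧ pvA xs t = pvA xs i)) : Int)

theorem pvP_succ (xs : List Int) (k : Nat) (hk : k < xs.length) :
    pvP xs (k + 1) = pvP xs k + pvA xs k := by
  unfold pvP pvA
  rw [List.getD_eq_getElem xs 0 hk, List.take_add_one, List.getElem?_eq_getElem hk,
    List.sum_append]
  simp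

theorem getD_map_range' {α : Type} (f : Nat → α) (n k : Nat) (d : α) (hk : k < n) :
    ((List.range n).map f).getD k d = f k := by
  simp [List.getD, hk]

-- the pfx list built by B's first loop is the table of pfx sums
theorem pfx_eq (xs : List Int) :
    xs.foldl (fun p x => p ++ [PySem.List.pyGetD p (-1) 0 + x]) ([0] : List Int)
      = (List.range (xs.length + 1)).map (pvP xs) := by
  induction xs using List.reverseRecOn with
  | nil => simp [pvP]
  | append_singleton ys x ih =>
    rw [List.foldl_append, ih]
    simp only [List.foldl_cons, List.foldl_nil]
    have hlast : PySem.List.pyGetD ((List.range (ys.length + 1)).map (pvP ys)) (-1) 0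
        = pvP ys ys.length := by
      rw [List.range_succ, List.map_append]
      simp only [List.map_cons, List.map_nil]
      exact PySem.List.pyGetD_neg_one_append_singleton _ _ _
    rw [hlast, show (ys ++ [x]).length = ys.length + 1 by simp]
    conv_rhs => rw [List.range_succ, List.map_append]
    congr 1
    · refine (List.map_congr_left ?_).symm
      intro k hk
      rw [List.mem_range] at hk
      unfold pvP
      rw [List.take_append_of_le_length (by omega)]
    · simp [pvP, List.take_length]

-- A's loop step and initial state, named for the proofs
def pvStepA (xs : List Int) (st : PySem.Dict (Int × Int) Int × Int × Int) (i : Int) :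
    PySem.Dict (Int × Int) Int × Int × Int :=
  let s := st.2.2 + PySem.List.pyGetD xs i 0
  let r := st.2.1 + st.1.getD (s - 3 * PySem.List.pyGetD xs i 0, PySem.List.pyGetD xs i 0) 0
  let d := st.1.modify (s, PySem.List.pyGetD xs (i + 1) 0) 0 (· + 1)
  (d, r, s)

def pvInitA (xs : List Int) : PySem.Dict (Int × Int) Int × Int × Int :=
  (PySem.Dict.empty.insert (0, PySem.List.pyGetD xs 0 0) 1, 0, 0)

-- A's loop invariant: after k iterations s is the k-th prefix sum, r is the number of
-- stable segments ending before index k, and the dict counts the (prefix_sum, value) pairs seen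
theorem A_inv (xs : List Int) (k : Nat) (hk : k ≤ xs.length - 1) (hn : 3 ≤ xs.length) :
    ((PySem.List.pyRange 0 (k : Int) 1).foldl (pvStepA xs) (pvInitA xs)).2.2 = pvP xs k ∧
    ((PySem.List.pyRange 0 (k : Int) 1).foldl (pvStepA xs) (pvInitA xs)).2.1
      = ((List.range k).map (pvCnt xs)).sum ∧
    ∀ key : Int × Int,
      ((PySem.List.pyRange 0 (k : Int) 1).foldl (pvStepA xs) (pvInitA xs)).1.getD key 0
        = ((List.range (k + 1)).countP (fun t => decide ((pvP xs t, pvA xs t) = key)) : Int) := by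
  induction k with
  | zero =>
    rw [PySem.List.pyRange_one_eq_nil (by omega)]
    refine ⟨by simp [pvInitA, pvP], by simp [pvInitA], ?_⟩
    intro key
    rw [List.foldl_nil]
    have h0 : PySem.List.pyGetD xs 0 0 = pvA xs 0 := PySem.List.pyGetD_zero xs 0
    simp only [pvInitA, PySem.Dict.getD_insert, PySem.Dict.getD_empty, h0]
    by_cases h : key = (0, pvA xs 0)
    · simp [h, pvP]
    · have h' : ¬ ((pvP xs 0, pvA xs 0) = key) := by
        simp only [pvP, List.take_zero, List.sum_nil]
        exact fun he => h he.symm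
      simp [h, h']
  | succ k ih =>
    have hklt : k < xs.length := by omega
    have hk1lt : k + 1 < xs.length := by omega
    obtain ⟨hs, hr, hd⟩ := ih (by omega)
    rw [show ((k + 1 : Nat) : Int) = (k : Int) + 1 by push_cast; ring,
      PySem.List.pyRange_one_succ_right (by positivity), List.foldl_append,
      List.foldl_cons, List.foldl_nil]
    have hak : PySem.List.pyGetD xs (k : Int) 0 = pvA xs k := PySem.List.pyGetD_natCast xs k 0
    have hak1 : PySem.List.pyGetD xs ((k : Int) + 1) 0 = pvA xs (k + 1) := by
      rw [show ((k : Int) + 1) = ((k + 1 : Nat) : Int) by push_cast; ring]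
      exact PySem.List.pyGetD_natCast xs (k + 1) 0
    simp only [pvStepA, hak, hak1, hs, hr, hd]
    have hsum : pvP xs k + pvA xs k = pvP xs (k + 1) := (pvP_succ xs k hklt).symm
    refine ⟨hsum, ?_, ?_⟩
    · -- the r component
      rw [hsum]
      have hcnt : (List.range (k + 1)).countP
            (fun t => decide ((pvP xs t, pvA xs t) = (pvP xs (k + 1) - 3 * pvA xs k, pvA xs k)))
          = (List.range (k + 1)).countP
            (fun t => decide (pvP xs (k + 1) - pvP xs t = 3 * pvA xs k ∧ pvA xs t = pvA xs k)) := by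
        refine List.countP_congr ?_
        intro t _
        simp only [decide_eq_true_eq, Prod.mk.injEq]
        constructor
        · rintro ⟨h1, h2⟩; exact ⟨by omega, h2⟩
        · rintro ⟨h1, h2⟩; exact ⟨by omega, h2⟩
      rw [hcnt]
      conv_rhs => rw [List.range_succ, List.map_append, List.sum_append]
      simp [pvCnt]
    · -- the dict component
      intro key
      rw [hsum, PySem.Dict.getD_modify, hd, hd]
      rw [List.range_succ (n := k + 1), List.countP_append, List.countP_cons, List.countP_nil]
      by_cases h : key = (pvP xs (k + 1), pvA xs (k + 1))
      · rw [if_pos h]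
        subst h
        simp
      · rw [if_neg h]
        have : decide ((pvP xs (k + 1), pvA xs (k + 1)) = key) = false := by
          simp; exact fun he => h he.symm
        simp [this]

theorem B_eq (xs : List Int) (hn : 3 ≤ xs.length) :
    count_stable_segments_alt xs = ((List.range (xs.length - 1)).map (pvCnt xs)).sum := by
  have hg : ¬ ((xs.length : Int) < 3) := by omega
  simp only [count_stable_segments_alt, hg, if_false, pfx_eq]
  rw [show ((xs.length : Int) - 1) = ((xs.length - 1 : Nat) : Int) by omega,
    PySem.List.pyRange_zero_natCast, List.foldl_map]
  have hpre : ∀ (j : Nat), j < xs.length + 1 →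
      PySem.List.pyGetD ((List.range (xs.length + 1)).map (pvP xs)) ((j : Nat) : Int) 0
        = pvP xs j := by
    intro j hj
    rw [PySem.List.pyGetD_natCast]
    exact getD_map_range' (pvP xs) _ j 0 hj
  refine Eq.trans (PySem.List.foldl_congr_mem' _ _
      (fun (r : Int) (i : Nat) => r + pvCnt xs i) _ ?_) ?_
  · intro i hi r
    rw [List.mem_range] at hi
    rw [show ((i : Int) + 1) = ((i + 1 : Nat) : Int) by push_cast; ring]
    rw [PySem.List.pyRange_zero_natCast, List.foldl_map]
    refine Eq.trans (PySem.List.foldl_congr_mem' _ _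
        (fun (r : Int) (t : Nat) =>
          if pvP xs (i + 1) - pvP xs t = 3 * pvA xs i ∧ pvA xs t = pvA xs i
          then r + 1 else r) _ ?_) ?_
    · intro t ht r'
      rw [List.mem_range] at ht
      rw [hpre (i + 1) (by omega), hpre t (by omega),
        PySem.List.pyGetD_natCast xs i, PySem.List.pyGetD_natCast xs t]
      rfl
    · rw [PySem.List.foldl_ite_add_one]
      simp [pvCnt]
  · rw [PySem.List.foldl_add]
    simp

theorem A_eq (xs : List Int) (hn : 3 ≤ xs.length) :
    count_stable_segments xs = ((List.range (xs.length - 1)).map (pvCnt xs)).sum := by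
  have hg : ¬ ((xs.length : Int) < 3) := by omega
  have h1 : count_stable_segments xs
      = ((PySem.List.pyRange 0 ((xs.length : Int) - 1) 1).foldl (pvStepA xs) (pvInitA xs)).2.1 := by
    simp only [count_stable_segments, hg, if_false]
    rfl
  rw [h1, show ((xs.length : Int) - 1) = ((xs.length - 1 : Nat) : Int) by omega]
  exact (A_inv xs (xs.length - 1) le_rfl hn).2.1

-- ===== VERDICT (by name: the statement is the Claim_ definition above) =====
theorem count_stable_segments_spec : Claim_equal_count_stable_segments := by
  intro input _
  unfold Spec_count_stable_segments
  by_cases hn : 3 ≤ input.length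
  · rw [A_eq input hn, B_eq input hn]
  · unfold count_stable_segments count_stable_segments_alt
    have : (input.length : Int) < 3 := by omega
    simp [this]
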